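-- pv_equiv track=rewrite | github.com/21A91A0478/GFG | Difficulty: Medium/Boolean Matrix/boolean-matrix.py | booleanMatrix
-- ===== SOURCE A (Python) =====
-- def booleanMatrix(mat):
--     # code here
--     r = set()
--     c = set()
--     for i in range(len(mat)):
--         for j in range(len(mat[0])):
--             if mat[i][j] == 1:
--                 r.add(i)
--                 c.add(j)
--
--
--     for i in range(len(mat)):
--         for j in range(len(mat[0])):
--             if i in r or j in c:
--                 mat[i][j] = 1
--
--     return mat
-- ===== SOURCE B (Python) =====
-- def booleanMatrix(mat):
--     # O(1) extra space: uses the first row and first column as markers.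
--     if not mat or not mat[0]:
--         return mat
--     n, m = len(mat), len(mat[0])
--     first_row_has = 1 in mat[0]
--     first_col_has = any(row[0] == 1 for row in mat)
--     for i in range(1, n):
--         for j in range(1, m):
--             if mat[i][j] == 1:
--                 mat[i][0] = 1
--                 mat[0][j] = 1
--     for i in range(1, n):
--         for j in range(1, m):
--             if mat[i][0] == 1 or mat[0][j] == 1:
--                 mat[i][j] = 1
--     if first_row_has:
--         for j in range(m):
--             mat[0][j] = 1
--     if first_col_has:
--         for i in range(n):
--             mat[i][0] = 1
--     return mat
-- ===== Notes on version B (the rewrite author's own statement) =====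
-- stated objective: alternative
-- what changed: Replaces A's auxiliary row/column index sets (built by one nested scan and consulted by a second) with the constant-extra-space marking technique: the matrix's own first row and first column are used as in-place markers for the inner cells, with two saved booleans for whether the first row / first column themselves contain a 1, followed by a marker-driven inner sweep and final first-row/first-column fills.
import Mathlib
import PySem

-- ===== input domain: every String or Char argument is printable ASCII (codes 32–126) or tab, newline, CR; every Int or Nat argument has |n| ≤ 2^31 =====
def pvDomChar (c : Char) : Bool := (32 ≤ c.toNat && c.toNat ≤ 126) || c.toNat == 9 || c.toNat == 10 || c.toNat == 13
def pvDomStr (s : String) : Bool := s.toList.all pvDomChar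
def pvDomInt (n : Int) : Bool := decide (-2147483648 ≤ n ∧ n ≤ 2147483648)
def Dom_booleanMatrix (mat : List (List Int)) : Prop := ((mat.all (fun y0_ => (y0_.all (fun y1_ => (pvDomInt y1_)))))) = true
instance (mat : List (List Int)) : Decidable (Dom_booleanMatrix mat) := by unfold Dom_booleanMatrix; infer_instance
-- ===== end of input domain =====

-- B replaces A's auxiliary row/column index sets with the constant-extra-space
-- technique that uses the matrix's first row and first column as in-place markers;
-- equivalence is about the RETURN value (the Python A mutates mat in place and
-- returns it; B mutates the same object and returns it, so side effects agree).

-- ===== PORT A =====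
-- mat[i][j] reads (pyGetD, default never used: range indices are in range under
-- Pre_) and the write mat[i][j] = 1 (pySetD); sets r, c are PySem.Set Int.
def booleanMatrix (mat : List (List Int)) : List (List Int) :=
  let rc : PySem.Set Int × PySem.Set Int :=
    (PySem.List.pyRange 0 (mat.length : Int) 1).foldl
      (fun rc i =>
        (PySem.List.pyRange 0 ((PySem.List.pyGetD mat 0 ([] : List Int)).length : Int) 1).foldl
          (fun rc j =>
            if PySem.List.pyGetD (PySem.List.pyGetD mat i ([] : List Int)) j 0 == 1 then
              (PySem.Set.add rc.1 i, PySem.Set.add rc.2 j)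
            else rc)
          rc)
      ((PySem.Set.empty : PySem.Set Int), (PySem.Set.empty : PySem.Set Int))
  (PySem.List.pyRange 0 (mat.length : Int) 1).foldl
    (fun m i =>
      (PySem.List.pyRange 0 ((PySem.List.pyGetD m 0 ([] : List Int)).length : Int) 1).foldl
        (fun m j =>
          if PySem.Set.contains rc.1 i || PySem.Set.contains rc.2 j then
            PySem.List.pySetD m i (PySem.List.pySetD (PySem.List.pyGetD m i ([] : List Int)) j 1)
          else m)
        m)
    mat

-- ===== PORT B =====
-- the cell read mat[i][j] and the cell write mat[i][j] = v (pyGetD/pySetD;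
-- indices are in range under Pre_)
def pvGetCell (M : List (List Int)) (i j : Int) : Int :=
  PySem.List.pyGetD (PySem.List.pyGetD M i ([] : List Int)) j 0
def pvSetCell (M : List (List Int)) (i j : Int) (v : Int) : List (List Int) :=
  PySem.List.pySetD M i (PySem.List.pySetD (PySem.List.pyGetD M i ([] : List Int)) j v)

def booleanMatrix_alt (mat : List (List Int)) : List (List Int) :=
  if mat = [] ∨ mat.headD [] = [] then mat
  else
    let n : Int := mat.length
    let m : Int := (mat.headD []).length
    let firstRowHas := (mat.headD []).contains (1 : Int)       -- 1 in mat[0]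
    let firstColHas := mat.any (fun row => PySem.List.pyGetD row 0 0 == 1)
    let M1 := (PySem.List.pyRange 1 n 1).foldl (fun M i =>
      (PySem.List.pyRange 1 m 1).foldl (fun M j =>
        if pvGetCell M i j == 1 then pvSetCell (pvSetCell M i 0 1) 0 j 1 else M) M) mat
    let M2 := (PySem.List.pyRange 1 n 1).foldl (fun M i =>
      (PySem.List.pyRange 1 m 1).foldl (fun M j =>
        if pvGetCell M i 0 == 1 || pvGetCell M 0 j == 1 then pvSetCell M i j 1 else M) M) M1
    let M3 := if firstRowHas then
        (PySem.List.pyRange 0 m 1).foldl (fun M j => pvSetCell M 0 j 1) M2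
      else M2
    let M4 := if firstColHas then
        (PySem.List.pyRange 0 n 1).foldl (fun M i => pvSetCell M i 0 1) M3
      else M3
    M4

-- ===== PRECONDITION & SPEC =====
-- A raises IndexError exactly when some row is shorter than the first row
-- (mat[i][j] with j < len(mat[0])); Pre_ excludes exactly those inputs.
def Pre_booleanMatrix (mat : List (List Int)) : Prop :=
  ∀ row ∈ mat, (mat.headD []).length ≤ row.length
instance (mat : List (List Int)) : Decidable (Pre_booleanMatrix mat) := by
  unfold Pre_booleanMatrix; infer_instance
def pvWitness_booleanMatrix : List (List Int) := [[0, 1], [1, 0]]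
def Spec_booleanMatrix (mat : List (List Int)) (out : List (List Int)) : Prop := out = booleanMatrix_alt mat
instance (mat : List (List Int)) (out : List (List Int)) : Decidable (Spec_booleanMatrix mat out) := by unfold Spec_booleanMatrix; infer_instance

-- ===== CLAIM (what is proved, stated in full; the proofs are below) =====
def Claim_equal_booleanMatrix : Prop := ∀ (mat : List (List Int)), Dom_booleanMatrix mat → Pre_booleanMatrix mat → Spec_booleanMatrix mat (booleanMatrix mat)

-- ===== LEMMAS AND PROOFS =====

-- the cell value of a matrix at Nat indices, and shape agreement with the input
def gC (M : List (List Int)) (k l : Nat) : Int := (M.getD k []).getD l 0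

def Shp (mat M : List (List Int)) : Prop :=
  M.length = mat.length ∧ ∀ k, (M.getD k []).length = (mat.getD k []).length

lemma headD_eq_getD_zero (mat : List (List Int)) : mat.headD [] = mat.getD 0 [] := by
  cases mat <;> rfl

lemma gD_set (xs : List Int) (i k : Nat) (v d : Int) :
    (xs.set i v).getD k d = if i = k ∧ i < xs.length then v else xs.getD k d := by
  rw [List.getD_eq_getElem?_getD, List.getElem?_set, List.getD_eq_getElem?_getD]
  split_ifs with h1 h2 h3 h3 <;>
    first | rfl | tauto | (subst h1; rw [List.getElem?_eq_none (by omega)])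

lemma setCell_eq (M : List (List Int)) (i j : Nat) (v : Int) :
    pvSetCell M (i : Int) (j : Int) v = M.set i ((M.getD i []).set j v) := by
  simp [pvSetCell]

lemma getCell_eq (M : List (List Int)) (k l : Nat) :
    pvGetCell M (k : Int) (l : Int) = gC M k l := by
  simp [pvGetCell, gC]

lemma gD_set_outer (M : List (List Int)) (i k : Nat) (r : List Int) :
    (M.set i r).getD k [] = if i = k ∧ i < M.length then r else M.getD k [] := by
  rw [List.getD_eq_getElem?_getD, List.getElem?_set, List.getD_eq_getElem?_getD]
  split_ifs with h1 h2 h3 h3 <;>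
    first | rfl | tauto | (subst h1; rw [List.getElem?_eq_none (by omega)])

lemma shp_setCell (mat M : List (List Int)) (i j : Nat) (v : Int) (hS : Shp mat M) :
    Shp mat (pvSetCell M (i : Int) (j : Int) v) := by
  rw [setCell_eq]
  refine ⟨by rw [List.length_set]; exact hS.1, fun k => ?_⟩
  rw [gD_set_outer]
  split_ifs with h
  · rw [List.length_set, ← h.1]; exact hS.2 i
  · exact hS.2 k

lemma gC_setCell (M : List (List Int)) (i j : Nat) (v : Int) (k l : Nat)
    (hi : i < M.length) (hj : j < (M.getD i []).length) :
    gC (pvSetCell M (i : Int) (j : Int) v) k l =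
      if k = i ∧ l = j then v else gC M k l := by
  rw [setCell_eq]; unfold gC
  rw [gD_set_outer]
  by_cases h1 : i = k
  · subst h1
    rw [if_pos ⟨rfl, hi⟩, gD_set]
    by_cases h2 : j = l
    · subst h2; rw [if_pos ⟨rfl, hj⟩, if_pos ⟨rfl, rfl⟩]
    · rw [if_neg (fun h => h2 h.1), if_neg (fun h => h2 h.2.symm)]
  · rw [if_neg (fun h => h1 h.1), if_neg (fun h => h1 h.1.symm)]

lemma shp_refl (mat : List (List Int)) : Shp mat mat := ⟨rfl, fun _ => rfl⟩

-- row lengths under Pre_: every row of mat has length ≥ the first row's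
lemma row_len_ge (mat : List (List Int)) (hpre : Pre_booleanMatrix mat) (k : Nat)
    (hk : k < mat.length) : (mat.headD []).length ≤ (mat.getD k []).length := by
  have : mat.getD k [] = mat[k] := by
    rw [List.getD_eq_getElem?_getD, List.getElem?_eq_getElem hk]; rfl
  rw [this]
  exact hpre _ (List.getElem_mem hk)

-- ---- stage 1 (markers) ----

lemma inner1B (mat M : List (List Int)) (k₀ : Nat)
    (hm : ∀ k, k < mat.length → (mat.headD []).length ≤ (mat.getD k []).length)
    (hk₁ : 1 ≤ k₀) (hk₀ : k₀ < mat.length) (hS : Shp mat M)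
    (hrow : ∀ l, 1 ≤ l → gC M k₀ l = gC mat k₀ l)
    (b : Nat) (hb : b ≤ (mat.headD []).length) :
    Shp mat ((PySem.List.pyRange 1 (b : Int) 1).foldl (fun M j =>
        if pvGetCell M (k₀ : Int) j == 1 then pvSetCell (pvSetCell M (k₀ : Int) 0 1) 0 j 1 else M) M) ∧
    ∀ k l, gC ((PySem.List.pyRange 1 (b : Int) 1).foldl (fun M j =>
        if pvGetCell M (k₀ : Int) j == 1 then pvSetCell (pvSetCell M (k₀ : Int) 0 1) 0 j 1 else M) M) k l =
      if k = k₀ ∧ l = 0 ∧ ∃ l', l' < b ∧ 1 ≤ l' ∧ gC mat k₀ l' = 1 then 1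
      else if k = 0 ∧ 1 ≤ l ∧ l < b ∧ gC mat k₀ l = 1 then 1
      else gC M k l := by
  induction b with
  | zero =>
    rw [show ((0 : Nat) : Int) = 0 from rfl, PySem.List.pyRange_one_eq_nil (by omega)]
    simp only [List.foldl_nil]
    refine ⟨hS, fun k l => ?_⟩
    rw [if_neg (by rintro ⟨-, -, l', hl', -⟩; omega), if_neg (by omega)]
  | succ b ih =>
    by_cases hb0 : b = 0
    · subst hb0
      rw [show ((0 + 1 : Nat) : Int) = 1 by norm_num, PySem.List.pyRange_one_eq_nil le_rfl]
      simp only [List.foldl_nil]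
      refine ⟨hS, fun k l => ?_⟩
      rw [if_neg (by rintro ⟨-, -, l', hl', hl1, -⟩; omega), if_neg (by omega)]
    obtain ⟨hS', hpt⟩ := ih (by omega)
    rw [show ((b + 1 : Nat) : Int) = (b : Int) + 1 by push_cast; ring,
        PySem.List.pyRange_one_succ_right (by exact_mod_cast Nat.one_le_iff_ne_zero.2 hb0),
        List.foldl_append]
    simp only [List.foldl_cons, List.foldl_nil]
    have e1 : pvGetCell ((PySem.List.pyRange 1 (b : Int) 1).foldl (fun M j =>
        if pvGetCell M (k₀ : Int) j == 1 then pvSetCell (pvSetCell M (k₀ : Int) 0 1) 0 j 1 else M) M)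
        (k₀ : Int) (b : Int) = gC mat k₀ b := by
      rw [getCell_eq, hpt, if_neg (by rintro ⟨-, hl0, -⟩; omega),
          if_neg (by rintro ⟨hk0, -⟩; omega), hrow b (by omega)]
    rw [e1]
    by_cases hcond : gC mat k₀ b = 1
    · rw [if_pos (by simp [hcond])]
      have hkF : k₀ < ((PySem.List.pyRange 1 (b : Int) 1).foldl (fun M j =>
          if pvGetCell M (k₀ : Int) j == 1 then pvSetCell (pvSetCell M (k₀ : Int) 0 1) 0 j 1 else M) M).length := by
        rw [hS'.1]; exact hk₀
      have h0F : 0 < (((PySem.List.pyRange 1 (b : Int) 1).foldl (fun M j =>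
          if pvGetCell M (k₀ : Int) j == 1 then pvSetCell (pvSetCell M (k₀ : Int) 0 1) 0 j 1 else M) M).getD k₀ []).length := by
        rw [hS'.2]; have := hm k₀ hk₀; omega
      have hA := gC_setCell ((PySem.List.pyRange 1 (b : Int) 1).foldl (fun M j =>
          if pvGetCell M (k₀ : Int) j == 1 then pvSetCell (pvSetCell M (k₀ : Int) 0 1) 0 j 1 else M) M) k₀ 0 1
      simp only [Nat.cast_zero] at hA
      have hSA : Shp mat (pvSetCell ((PySem.List.pyRange 1 (b : Int) 1).foldl (fun M j =>
          if pvGetCell M (k₀ : Int) j == 1 then pvSetCell (pvSetCell M (k₀ : Int) 0 1) 0 j 1 else M) M) (k₀ : Int) 0 1) := by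
        have := shp_setCell mat _ k₀ 0 1 hS'
        simpa using this
      have h0B : 0 < (pvSetCell ((PySem.List.pyRange 1 (b : Int) 1).foldl (fun M j =>
          if pvGetCell M (k₀ : Int) j == 1 then pvSetCell (pvSetCell M (k₀ : Int) 0 1) 0 j 1 else M) M) (k₀ : Int) 0 1).length := by
        rw [hSA.1]; omega
      have hbB : b < ((pvSetCell ((PySem.List.pyRange 1 (b : Int) 1).foldl (fun M j =>
          if pvGetCell M (k₀ : Int) j == 1 then pvSetCell (pvSetCell M (k₀ : Int) 0 1) 0 j 1 else M) M) (k₀ : Int) 0 1).getD 0 []).length := by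
        rw [hSA.2, ← headD_eq_getD_zero]; omega
      have hB := gC_setCell (pvSetCell ((PySem.List.pyRange 1 (b : Int) 1).foldl (fun M j =>
          if pvGetCell M (k₀ : Int) j == 1 then pvSetCell (pvSetCell M (k₀ : Int) 0 1) 0 j 1 else M) M) (k₀ : Int) 0 1) 0 b 1
      simp only [Nat.cast_zero] at hB
      refine ⟨by have := shp_setCell mat _ 0 b 1 hSA; simpa using this, fun k l => ?_⟩
      rw [hB _ _ h0B hbB, hA _ _ hkF h0F, hpt]
      by_cases h1 : k = 0 ∧ l = b
      · have hn1 : ¬ (k = k₀ ∧ l = 0 ∧ ∃ l', l' < b + 1 ∧ 1 ≤ l' ∧ gC mat k₀ l' = 1) := by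
          rintro ⟨hk', -⟩; omega
        rw [if_pos h1, if_neg hn1, if_pos ⟨h1.1, by omega, by omega, h1.2 ▸ hcond⟩]
      · rw [if_neg h1]
        by_cases h2 : k = k₀ ∧ l = 0
        · rw [if_pos h2, if_pos ⟨h2.1, h2.2, b, by omega, by omega, hcond⟩]
        · have hn2 : ¬ (k = k₀ ∧ l = 0 ∧ ∃ l', l' < b ∧ 1 ≤ l' ∧ gC mat k₀ l' = 1) := by
            rintro ⟨hk', hl', -⟩; exact h2 ⟨hk', hl'⟩
          have hn3 : ¬ (k = k₀ ∧ l = 0 ∧ ∃ l', l' < b + 1 ∧ 1 ≤ l' ∧ gC mat k₀ l' = 1) := by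
            rintro ⟨hk', hl', -⟩; exact h2 ⟨hk', hl'⟩
          rw [if_neg h2, if_neg hn2, if_neg hn3]
          by_cases h3 : k = 0 ∧ 1 ≤ l ∧ l < b ∧ gC mat k₀ l = 1
          · rw [if_pos h3, if_pos ⟨h3.1, h3.2.1, by omega, h3.2.2.2⟩]
          · have hn4 : ¬ (k = 0 ∧ 1 ≤ l ∧ l < b + 1 ∧ gC mat k₀ l = 1) := by
              rintro ⟨ha', hb', hc', hd'⟩
              by_cases hlb : l = b
              · exact h1 ⟨ha', hlb⟩
              · exact h3 ⟨ha', hb', by omega, hd'⟩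
            rw [if_neg h3, if_neg hn4]
    · rw [if_neg (by simpa using hcond)]
      refine ⟨hS', fun k l => ?_⟩
      rw [hpt]
      by_cases h1 : k = k₀ ∧ l = 0 ∧ ∃ l', l' < b ∧ 1 ≤ l' ∧ gC mat k₀ l' = 1
      · obtain ⟨ha', hb', l', hl', h1l, hv⟩ := h1
        rw [if_pos ⟨ha', hb', l', hl', h1l, hv⟩,
            if_pos (⟨ha', hb', l', by omega, h1l, hv⟩ :
              k = k₀ ∧ l = 0 ∧ ∃ l', l' < b + 1 ∧ 1 ≤ l' ∧ gC mat k₀ l' = 1)]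
      · have hn1 : ¬ (k = k₀ ∧ l = 0 ∧ ∃ l', l' < b + 1 ∧ 1 ≤ l' ∧ gC mat k₀ l' = 1) := by
          rintro ⟨ha', hb', l', hl', h1l, hv⟩
          by_cases hlb : l' = b
          · exact hcond (hlb ▸ hv)
          · exact h1 ⟨ha', hb', l', by omega, h1l, hv⟩
        rw [if_neg h1, if_neg hn1]
        by_cases h2 : k = 0 ∧ 1 ≤ l ∧ l < b ∧ gC mat k₀ l = 1
        · rw [if_pos h2, if_pos ⟨h2.1, h2.2.1, by omega, h2.2.2.2⟩]
        · have hn2 : ¬ (k = 0 ∧ 1 ≤ l ∧ l < b + 1 ∧ gC mat k₀ l = 1) := by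
            rintro ⟨ha', hb', hc', hd'⟩
            by_cases hlb : l = b
            · exact hcond (hlb ▸ hd')
            · exact h2 ⟨ha', hb', by omega, hd'⟩
          rw [if_neg h2, if_neg hn2]

lemma outer1B (mat : List (List Int))
    (hm : ∀ k, k < mat.length → (mat.headD []).length ≤ (mat.getD k []).length)
    (a : Nat) (ha : a ≤ mat.length) :
    Shp mat ((PySem.List.pyRange 1 (a : Int) 1).foldl (fun M i =>
        (PySem.List.pyRange 1 ((mat.headD []).length : Int) 1).foldl (fun M j =>
          if pvGetCell M i j == 1 then pvSetCell (pvSetCell M i 0 1) 0 j 1 else M) M) mat) ∧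
    ∀ k l, gC ((PySem.List.pyRange 1 (a : Int) 1).foldl (fun M i =>
        (PySem.List.pyRange 1 ((mat.headD []).length : Int) 1).foldl (fun M j =>
          if pvGetCell M i j == 1 then pvSetCell (pvSetCell M i 0 1) 0 j 1 else M) M) mat) k l =
      if l = 0 ∧ 1 ≤ k ∧ k < a ∧ ∃ l', l' < (mat.headD []).length ∧ 1 ≤ l' ∧ gC mat k l' = 1 then 1
      else if k = 0 ∧ 1 ≤ l ∧ l < (mat.headD []).length ∧ ∃ k', k' < a ∧ 1 ≤ k' ∧ gC mat k' l = 1 then 1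
      else gC mat k l := by
  induction a with
  | zero =>
    rw [show PySem.List.pyRange 1 ((0 : Nat) : Int) 1 = [] from PySem.List.pyRange_one_eq_nil (by omega)]
    simp only [List.foldl_nil]
    refine ⟨shp_refl mat, fun k l => ?_⟩
    rw [if_neg (by rintro ⟨-, -, hka, -⟩; omega),
        if_neg (by rintro ⟨-, -, -, k', hk', -⟩; omega)]
  | succ a ih =>
    by_cases ha0 : a = 0
    · subst ha0
      rw [show ((0 + 1 : Nat) : Int) = 1 by norm_num,
          show PySem.List.pyRange 1 (1 : Int) 1 = [] from PySem.List.pyRange_one_eq_nil le_rfl]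
      simp only [List.foldl_nil]
      refine ⟨shp_refl mat, fun k l => ?_⟩
      rw [if_neg (by rintro ⟨-, hk1, hka, -⟩; omega),
          if_neg (by rintro ⟨-, -, -, k', hk', hk1, -⟩; omega)]
    obtain ⟨hS', hpt⟩ := ih (by omega)
    rw [show ((a + 1 : Nat) : Int) = (a : Int) + 1 by push_cast; ring,
        PySem.List.pyRange_one_succ_right (by exact_mod_cast Nat.one_le_iff_ne_zero.2 ha0),
        List.foldl_append]
    simp only [List.foldl_cons, List.foldl_nil]
    have hrow : ∀ l, 1 ≤ l → gC ((PySem.List.pyRange 1 (a : Int) 1).foldl (fun M i =>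
        (PySem.List.pyRange 1 ((mat.headD []).length : Int) 1).foldl (fun M j =>
          if pvGetCell M i j == 1 then pvSetCell (pvSetCell M i 0 1) 0 j 1 else M) M) mat) a l
        = gC mat a l := by
      intro l hl
      rw [hpt, if_neg (by rintro ⟨hl0, -⟩; omega), if_neg (by rintro ⟨hk0, -⟩; omega)]
    obtain ⟨hS'', hpt'⟩ := inner1B mat _ a hm (by omega) (by omega) hS' hrow
      ((mat.headD []).length) le_rfl
    refine ⟨hS'', fun k l => ?_⟩
    rw [hpt' k l, hpt]
    by_cases h1 : k = a ∧ l = 0 ∧ ∃ l', l' < (mat.headD []).length ∧ 1 ≤ l' ∧ gC mat a l' = 1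
    · rw [if_pos h1, if_pos ⟨h1.2.1, by omega, by omega, h1.1 ▸ h1.2.2⟩]
    · rw [if_neg h1]
      by_cases h2 : k = 0 ∧ 1 ≤ l ∧ l < (mat.headD []).length ∧ gC mat a l = 1
      · have hn1 : ¬ (l = 0 ∧ 1 ≤ k ∧ k < a + 1 ∧
            ∃ l', l' < (mat.headD []).length ∧ 1 ≤ l' ∧ gC mat k l' = 1) := by
          rintro ⟨hl0, -⟩; omega
        rw [if_pos h2, if_neg hn1,
            if_pos ⟨h2.1, h2.2.1, h2.2.2.1, a, by omega, by omega, h2.2.2.2⟩]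
      · rw [if_neg h2]
        by_cases h3 : l = 0 ∧ 1 ≤ k ∧ k < a ∧ ∃ l', l' < (mat.headD []).length ∧ 1 ≤ l' ∧ gC mat k l' = 1
        · rw [if_pos h3, if_pos ⟨h3.1, h3.2.1, by omega, h3.2.2.2⟩]
        · have hn2 : ¬ (l = 0 ∧ 1 ≤ k ∧ k < a + 1 ∧
              ∃ l', l' < (mat.headD []).length ∧ 1 ≤ l' ∧ gC mat k l' = 1) := by
            rintro ⟨ha', hb', hc', hex⟩
            by_cases hka : k = a
            · exact h1 ⟨hka, ha', hka ▸ hex⟩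
            · exact h3 ⟨ha', hb', by omega, hex⟩
          rw [if_neg h3, if_neg hn2]
          by_cases h4 : k = 0 ∧ 1 ≤ l ∧ l < (mat.headD []).length ∧ ∃ k', k' < a ∧ 1 ≤ k' ∧ gC mat k' l = 1
          · obtain ⟨ha', hb', hc', k', hk', h1k, hv⟩ := h4
            rw [if_pos ⟨ha', hb', hc', k', hk', h1k, hv⟩,
                if_pos (⟨ha', hb', hc', k', by omega, h1k, hv⟩ :
                  k = 0 ∧ 1 ≤ l ∧ l < (mat.headD []).length ∧
                    ∃ k', k' < a + 1 ∧ 1 ≤ k' ∧ gC mat k' l = 1)]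
          · have hn3 : ¬ (k = 0 ∧ 1 ≤ l ∧ l < (mat.headD []).length ∧
                ∃ k', k' < a + 1 ∧ 1 ≤ k' ∧ gC mat k' l = 1) := by
              rintro ⟨ha', hb', hc', k', hk', h1k, hv⟩
              by_cases hka : k' = a
              · exact h2 ⟨ha', hb', hc', hka ▸ hv⟩
              · exact h4 ⟨ha', hb', hc', k', by omega, h1k, hv⟩
            rw [if_neg h4, if_neg hn3]

-- ---- stage 2 (marker-driven sweep of the inner cells) ----

lemma inner2B (mat M : List (List Int)) (k₀ : Nat)
    (hm : ∀ k, k < mat.length → (mat.headD []).length ≤ (mat.getD k []).length)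
    (hk₁ : 1 ≤ k₀) (hk₀ : k₀ < mat.length) (hS : Shp mat M)
    (b : Nat) (hb : b ≤ (mat.headD []).length) :
    Shp mat ((PySem.List.pyRange 1 (b : Int) 1).foldl (fun M j =>
        if pvGetCell M (k₀ : Int) 0 == 1 || pvGetCell M 0 j == 1 then pvSetCell M (k₀ : Int) j 1 else M) M) ∧
    ∀ k l, gC ((PySem.List.pyRange 1 (b : Int) 1).foldl (fun M j =>
        if pvGetCell M (k₀ : Int) 0 == 1 || pvGetCell M 0 j == 1 then pvSetCell M (k₀ : Int) j 1 else M) M) k l =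
      if k = k₀ ∧ 1 ≤ l ∧ l < b ∧ (gC M k₀ 0 = 1 ∨ gC M 0 l = 1) then 1
      else gC M k l := by
  induction b with
  | zero =>
    rw [show ((0 : Nat) : Int) = 0 from rfl, PySem.List.pyRange_one_eq_nil (by omega)]
    simp only [List.foldl_nil]
    exact ⟨hS, fun k l => by rw [if_neg (by omega)]⟩
  | succ b ih =>
    by_cases hb0 : b = 0
    · subst hb0
      rw [show ((0 + 1 : Nat) : Int) = 1 by norm_num, PySem.List.pyRange_one_eq_nil le_rfl]
      simp only [List.foldl_nil]
      exact ⟨hS, fun k l => by rw [if_neg (by omega)]⟩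
    obtain ⟨hS', hpt⟩ := ih (by omega)
    rw [show ((b + 1 : Nat) : Int) = (b : Int) + 1 by push_cast; ring,
        PySem.List.pyRange_one_succ_right (by exact_mod_cast Nat.one_le_iff_ne_zero.2 hb0),
        List.foldl_append]
    simp only [List.foldl_cons, List.foldl_nil]
    have e1 : pvGetCell ((PySem.List.pyRange 1 (b : Int) 1).foldl (fun M j =>
        if pvGetCell M (k₀ : Int) 0 == 1 || pvGetCell M 0 j == 1 then pvSetCell M (k₀ : Int) j 1 else M) M)
        (k₀ : Int) 0 = gC M k₀ 0 := by
      have h := getCell_eq ((PySem.List.pyRange 1 (b : Int) 1).foldl (fun M j =>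
        if pvGetCell M (k₀ : Int) 0 == 1 || pvGetCell M 0 j == 1 then pvSetCell M (k₀ : Int) j 1 else M) M) k₀ 0
      simp only [Nat.cast_zero] at h
      rw [h, hpt, if_neg (by omega)]
    have e2 : pvGetCell ((PySem.List.pyRange 1 (b : Int) 1).foldl (fun M j =>
        if pvGetCell M (k₀ : Int) 0 == 1 || pvGetCell M 0 j == 1 then pvSetCell M (k₀ : Int) j 1 else M) M)
        0 (b : Int) = gC M 0 b := by
      have h := getCell_eq ((PySem.List.pyRange 1 (b : Int) 1).foldl (fun M j =>
        if pvGetCell M (k₀ : Int) 0 == 1 || pvGetCell M 0 j == 1 then pvSetCell M (k₀ : Int) j 1 else M) M) 0 b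
      simp only [Nat.cast_zero] at h
      rw [h, hpt, if_neg (by omega)]
    rw [e1, e2]
    by_cases hcond : gC M k₀ 0 = 1 ∨ gC M 0 b = 1
    · rw [if_pos (by rcases hcond with h | h <;> simp [h])]
      have hkF : k₀ < ((PySem.List.pyRange 1 (b : Int) 1).foldl (fun M j =>
          if pvGetCell M (k₀ : Int) 0 == 1 || pvGetCell M 0 j == 1 then pvSetCell M (k₀ : Int) j 1 else M) M).length := by
        rw [hS'.1]; exact hk₀
      have hbF : b < (((PySem.List.pyRange 1 (b : Int) 1).foldl (fun M j =>
          if pvGetCell M (k₀ : Int) 0 == 1 || pvGetCell M 0 j == 1 then pvSetCell M (k₀ : Int) j 1 else M) M).getD k₀ []).length := by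
        rw [hS'.2]; have := hm k₀ hk₀; omega
      refine ⟨shp_setCell mat _ k₀ b 1 hS', fun k l => ?_⟩
      rw [gC_setCell _ k₀ b 1 k l hkF hbF, hpt]
      by_cases h1 : k = k₀ ∧ l = b
      · rw [if_pos h1, if_pos ⟨h1.1, by omega, by omega, h1.2 ▸ hcond⟩]
      · rw [if_neg h1]
        by_cases h2 : k = k₀ ∧ 1 ≤ l ∧ l < b ∧ (gC M k₀ 0 = 1 ∨ gC M 0 l = 1)
        · rw [if_pos h2, if_pos ⟨h2.1, h2.2.1, by omega, h2.2.2.2⟩]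
        · rw [if_neg h2, if_neg ?_]
          rintro ⟨ha', hb', hc', hd'⟩
          have hlb : l ≠ b := fun h => h1 ⟨ha', h⟩
          exact h2 ⟨ha', hb', by omega, hd'⟩
    · rw [if_neg (by simpa using hcond)]
      refine ⟨hS', fun k l => ?_⟩
      rw [hpt]
      by_cases h2 : k = k₀ ∧ 1 ≤ l ∧ l < b ∧ (gC M k₀ 0 = 1 ∨ gC M 0 l = 1)
      · rw [if_pos h2, if_pos ⟨h2.1, h2.2.1, by omega, h2.2.2.2⟩]
      · rw [if_neg h2, if_neg ?_]
        rintro ⟨ha', hb', hc', hd'⟩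
        by_cases hlb : l = b
        · exact hcond (hlb ▸ hd')
        · exact h2 ⟨ha', hb', by omega, hd'⟩

lemma outer2B (mat M1 : List (List Int))
    (hm : ∀ k, k < mat.length → (mat.headD []).length ≤ (mat.getD k []).length)
    (hS : Shp mat M1) (a : Nat) (ha : a ≤ mat.length) :
    Shp mat ((PySem.List.pyRange 1 (a : Int) 1).foldl (fun M i =>
        (PySem.List.pyRange 1 ((mat.headD []).length : Int) 1).foldl (fun M j =>
          if pvGetCell M i 0 == 1 || pvGetCell M 0 j == 1 then pvSetCell M i j 1 else M) M) M1) ∧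
    ∀ k l, gC ((PySem.List.pyRange 1 (a : Int) 1).foldl (fun M i =>
        (PySem.List.pyRange 1 ((mat.headD []).length : Int) 1).foldl (fun M j =>
          if pvGetCell M i 0 == 1 || pvGetCell M 0 j == 1 then pvSetCell M i j 1 else M) M) M1) k l =
      if 1 ≤ k ∧ k < a ∧ 1 ≤ l ∧ l < (mat.headD []).length ∧ (gC M1 k 0 = 1 ∨ gC M1 0 l = 1) then 1
      else gC M1 k l := by
  induction a with
  | zero =>
    rw [show PySem.List.pyRange 1 ((0 : Nat) : Int) 1 = [] from PySem.List.pyRange_one_eq_nil (by omega)]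
    simp only [List.foldl_nil]
    exact ⟨hS, fun k l => by rw [if_neg (by omega)]⟩
  | succ a ih =>
    by_cases ha0 : a = 0
    · subst ha0
      rw [show ((0 + 1 : Nat) : Int) = 1 by norm_num, PySem.List.pyRange_one_eq_nil le_rfl]
      simp only [List.foldl_nil]
      exact ⟨hS, fun k l => by rw [if_neg (by omega)]⟩
    obtain ⟨hS', hpt⟩ := ih (by omega)
    rw [show ((a + 1 : Nat) : Int) = (a : Int) + 1 by push_cast; ring,
        PySem.List.pyRange_one_succ_right (by exact_mod_cast Nat.one_le_iff_ne_zero.2 ha0),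
        List.foldl_append]
    simp only [List.foldl_cons, List.foldl_nil]
    obtain ⟨hS'', hpt'⟩ := inner2B mat _ a hm (by omega) (by omega) hS'
      ((mat.headD []).length) le_rfl
    refine ⟨hS'', fun k l => ?_⟩
    rw [hpt' k l]
    have e1 : gC ((PySem.List.pyRange 1 (a : Int) 1).foldl (fun M i =>
        (PySem.List.pyRange 1 ((mat.headD []).length : Int) 1).foldl (fun M j =>
          if pvGetCell M i 0 == 1 || pvGetCell M 0 j == 1 then pvSetCell M i j 1 else M) M) M1) a 0
        = gC M1 a 0 := by rw [hpt, if_neg (by omega)]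
    have e2 : gC ((PySem.List.pyRange 1 (a : Int) 1).foldl (fun M i =>
        (PySem.List.pyRange 1 ((mat.headD []).length : Int) 1).foldl (fun M j =>
          if pvGetCell M i 0 == 1 || pvGetCell M 0 j == 1 then pvSetCell M i j 1 else M) M) M1) 0 l
        = gC M1 0 l := by rw [hpt, if_neg (by omega)]
    rw [e1, e2, hpt]
    by_cases h1 : k = a ∧ 1 ≤ l ∧ l < (mat.headD []).length ∧ (gC M1 a 0 = 1 ∨ gC M1 0 l = 1)
    · rw [if_pos h1, if_pos ⟨by omega, by omega, h1.2.1, h1.2.2.1, h1.1 ▸ h1.2.2.2⟩]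
    · rw [if_neg h1]
      by_cases h2 : 1 ≤ k ∧ k < a ∧ 1 ≤ l ∧ l < (mat.headD []).length ∧ (gC M1 k 0 = 1 ∨ gC M1 0 l = 1)
      · rw [if_pos h2, if_pos ⟨h2.1, by omega, h2.2.2⟩]
      · rw [if_neg h2, if_neg ?_]
        rintro ⟨ha', hb', hc', hd', he'⟩
        by_cases hka : k = a
        · exact h1 ⟨hka, hc', hd', hka ▸ he'⟩
        · exact h2 ⟨ha', by omega, hc', hd', he'⟩

-- ---- stages 3 and 4 (first-row / first-column fills) ----

lemma fillRowB (mat M : List (List Int))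
    (hS : Shp mat M) (hne : mat ≠ [])
    (b : Nat) (hb : b ≤ (mat.headD []).length) :
    Shp mat ((PySem.List.pyRange 0 (b : Int) 1).foldl (fun M j => pvSetCell M 0 j 1) M) ∧
    ∀ k l, gC ((PySem.List.pyRange 0 (b : Int) 1).foldl (fun M j => pvSetCell M 0 j 1) M) k l =
      if k = 0 ∧ l < b then 1 else gC M k l := by
  induction b with
  | zero =>
    rw [show ((0 : Nat) : Int) = 0 from rfl, PySem.List.pyRange_one_eq_nil le_rfl]
    simp only [List.foldl_nil]
    exact ⟨hS, fun k l => by rw [if_neg (by omega)]⟩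
  | succ b ih =>
    obtain ⟨hS', hpt⟩ := ih (by omega)
    rw [show ((b + 1 : Nat) : Int) = (b : Int) + 1 by push_cast; ring,
        PySem.List.pyRange_one_succ_right (by positivity), List.foldl_append]
    simp only [List.foldl_cons, List.foldl_nil]
    have h0F : 0 < ((PySem.List.pyRange 0 (b : Int) 1).foldl (fun M j => pvSetCell M 0 j 1) M).length := by
      rw [hS'.1]; exact List.length_pos_of_ne_nil hne
    have hbF : b < (((PySem.List.pyRange 0 (b : Int) 1).foldl (fun M j => pvSetCell M 0 j 1) M).getD 0 []).length := by
      rw [hS'.2, ← headD_eq_getD_zero]; omega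
    refine ⟨shp_setCell mat _ 0 b 1 hS', fun k l => ?_⟩
    have hstep := gC_setCell _ 0 b 1 k l h0F hbF
    simp only [Nat.cast_zero] at hstep
    rw [hstep, hpt]
    split_ifs <;> first | rfl | omega

lemma fillColB (mat M : List (List Int))
    (hm : ∀ k, k < mat.length → (mat.headD []).length ≤ (mat.getD k []).length)
    (hS : Shp mat M) (hm1 : 1 ≤ (mat.headD []).length)
    (b : Nat) (hb : b ≤ mat.length) :
    Shp mat ((PySem.List.pyRange 0 (b : Int) 1).foldl (fun M i => pvSetCell M i 0 1) M) ∧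
    ∀ k l, gC ((PySem.List.pyRange 0 (b : Int) 1).foldl (fun M i => pvSetCell M i 0 1) M) k l =
      if l = 0 ∧ k < b then 1 else gC M k l := by
  induction b with
  | zero =>
    rw [show ((0 : Nat) : Int) = 0 from rfl, PySem.List.pyRange_one_eq_nil le_rfl]
    simp only [List.foldl_nil]
    exact ⟨hS, fun k l => by rw [if_neg (by omega)]⟩
  | succ b ih =>
    obtain ⟨hS', hpt⟩ := ih (by omega)
    rw [show ((b + 1 : Nat) : Int) = (b : Int) + 1 by push_cast; ring,
        PySem.List.pyRange_one_succ_right (by positivity), List.foldl_append]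
    simp only [List.foldl_cons, List.foldl_nil]
    have hbF : b < ((PySem.List.pyRange 0 (b : Int) 1).foldl (fun M i => pvSetCell M i 0 1) M).length := by
      rw [hS'.1]; omega
    have h0F : 0 < (((PySem.List.pyRange 0 (b : Int) 1).foldl (fun M i => pvSetCell M i 0 1) M).getD b []).length := by
      rw [hS'.2]; have := hm b (by omega); omega
    refine ⟨shp_setCell mat _ b 0 1 hS', fun k l => ?_⟩
    have hstep := gC_setCell _ b 0 1 k l hbF h0F
    simp only [Nat.cast_zero] at hstep
    rw [hstep, hpt]
    split_ifs <;> first | rfl | omega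

-- ---- B assembled pointwise ----

lemma ite_one (c : Prop) [Decidable c] {y : Int} (h : y = 1) : (if c then (1 : Int) else y) = 1 := by
  split_ifs <;> simp [h]

lemma B_spec (mat : List (List Int)) (hpre : Pre_booleanMatrix mat)
    (hne : mat ≠ []) (hm0 : mat.headD [] ≠ []) :
    Shp mat (booleanMatrix_alt mat) ∧
    ∀ k l, k < mat.length → gC (booleanMatrix_alt mat) k l =
      if l < (mat.headD []).length ∧
          ((∃ l', l' < (mat.headD []).length ∧ gC mat k l' = 1) ∨
           (∃ k', k' < mat.length ∧ gC mat k' l = 1)) then 1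
      else gC mat k l := by
  have hg : ¬ (mat = [] ∨ mat.headD [] = []) := by push_neg; exact ⟨hne, hm0⟩
  have hm : ∀ k, k < mat.length → (mat.headD []).length ≤ (mat.getD k []).length :=
    fun k hk => row_len_ge mat hpre k hk
  have hm1 : 1 ≤ (mat.headD []).length := by
    have := List.length_pos_of_ne_nil hm0; omega
  have hn1 : 1 ≤ mat.length := by
    have := List.length_pos_of_ne_nil hne; omega
  unfold booleanMatrix_alt
  rw [if_neg hg]
  show Shp mat ((if mat.any (fun row => PySem.List.pyGetD row 0 0 == 1) = true then
      (PySem.List.pyRange 0 (mat.length : Int) 1).foldl (fun M i => pvSetCell M i 0 1) ((if (mat.headD []).contains (1 : Int) = true then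
      (PySem.List.pyRange 0 ((mat.headD []).length : Int) 1).foldl (fun M j => pvSetCell M 0 j 1) ((PySem.List.pyRange 1 (mat.length : Int) 1).foldl (fun M i =>
      (PySem.List.pyRange 1 ((mat.headD []).length : Int) 1).foldl (fun M j =>
        if pvGetCell M i 0 == 1 || pvGetCell M 0 j == 1 then pvSetCell M i j 1 else M) M) ((PySem.List.pyRange 1 (mat.length : Int) 1).foldl (fun M i =>
      (PySem.List.pyRange 1 ((mat.headD []).length : Int) 1).foldl (fun M j =>
        if pvGetCell M i j == 1 then pvSetCell (pvSetCell M i 0 1) 0 j 1 else M) M) mat))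
    else ((PySem.List.pyRange 1 (mat.length : Int) 1).foldl (fun M i =>
      (PySem.List.pyRange 1 ((mat.headD []).length : Int) 1).foldl (fun M j =>
        if pvGetCell M i 0 == 1 || pvGetCell M 0 j == 1 then pvSetCell M i j 1 else M) M) ((PySem.List.pyRange 1 (mat.length : Int) 1).foldl (fun M i =>
      (PySem.List.pyRange 1 ((mat.headD []).length : Int) 1).foldl (fun M j =>
        if pvGetCell M i j == 1 then pvSetCell (pvSetCell M i 0 1) 0 j 1 else M) M) mat))))
    else ((if (mat.headD []).contains (1 : Int) = true then
      (PySem.List.pyRange 0 ((mat.headD []).length : Int) 1).foldl (fun M j => pvSetCell M 0 j 1) ((PySem.List.pyRange 1 (mat.length : Int) 1).foldl (fun M i =>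
      (PySem.List.pyRange 1 ((mat.headD []).length : Int) 1).foldl (fun M j =>
        if pvGetCell M i 0 == 1 || pvGetCell M 0 j == 1 then pvSetCell M i j 1 else M) M) ((PySem.List.pyRange 1 (mat.length : Int) 1).foldl (fun M i =>
      (PySem.List.pyRange 1 ((mat.headD []).length : Int) 1).foldl (fun M j =>
        if pvGetCell M i j == 1 then pvSetCell (pvSetCell M i 0 1) 0 j 1 else M) M) mat))
    else ((PySem.List.pyRange 1 (mat.length : Int) 1).foldl (fun M i =>
      (PySem.List.pyRange 1 ((mat.headD []).length : Int) 1).foldl (fun M j =>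
        if pvGetCell M i 0 == 1 || pvGetCell M 0 j == 1 then pvSetCell M i j 1 else M) M) ((PySem.List.pyRange 1 (mat.length : Int) 1).foldl (fun M i =>
      (PySem.List.pyRange 1 ((mat.headD []).length : Int) 1).foldl (fun M j =>
        if pvGetCell M i j == 1 then pvSetCell (pvSetCell M i 0 1) 0 j 1 else M) M) mat)))))) ∧ _
  obtain ⟨hS1, hpt1⟩ := outer1B mat hm mat.length le_rfl
  set M1 := (PySem.List.pyRange 1 (mat.length : Int) 1).foldl (fun M i =>
      (PySem.List.pyRange 1 ((mat.headD []).length : Int) 1).foldl (fun M j =>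
        if pvGetCell M i j == 1 then pvSetCell (pvSetCell M i 0 1) 0 j 1 else M) M) mat with hM1
  obtain ⟨hS2, hpt2⟩ := outer2B mat M1 hm hS1 mat.length le_rfl
  set M2 := (PySem.List.pyRange 1 (mat.length : Int) 1).foldl (fun M i =>
      (PySem.List.pyRange 1 ((mat.headD []).length : Int) 1).foldl (fun M j =>
        if pvGetCell M i 0 == 1 || pvGetCell M 0 j == 1 then pvSetCell M i j 1 else M) M) M1 with hM2
  -- first-row / first-column boolean tests, as propositions about mat
  have hFR : ((mat.headD []).contains (1 : Int) = true)
      ↔ (∃ l', l' < (mat.headD []).length ∧ gC mat 0 l' = 1) := by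
    rw [List.contains_iff_mem]
    constructor
    · intro h
      obtain ⟨i, hi, hv⟩ := List.mem_iff_getElem.1 h
      refine ⟨i, hi, ?_⟩
      unfold gC
      rw [← headD_eq_getD_zero, List.getD_eq_getElem?_getD, List.getElem?_eq_getElem hi]
      simpa using hv
    · rintro ⟨l', hl', hv⟩
      unfold gC at hv
      rw [← headD_eq_getD_zero, List.getD_eq_getElem?_getD, List.getElem?_eq_getElem hl'] at hv
      exact List.mem_iff_getElem.2 ⟨l', hl', by simpa using hv⟩
  have hFC : (mat.any (fun row => PySem.List.pyGetD row 0 0 == 1) = true)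
      ↔ (∃ k', k' < mat.length ∧ gC mat k' 0 = 1) := by
    rw [List.any_eq_true]
    constructor
    · rintro ⟨row, hrow, hv⟩
      obtain ⟨k, hk, rfl⟩ := List.mem_iff_getElem.1 hrow
      refine ⟨k, hk, ?_⟩
      have hgk : mat.getD k [] = mat[k] := by
        rw [List.getD_eq_getElem?_getD, List.getElem?_eq_getElem hk]; rfl
      unfold gC
      rw [hgk]
      rw [PySem.List.pyGetD_zero] at hv
      simpa using hv
    · rintro ⟨k, hk, hv⟩
      have hgk : mat.getD k [] = mat[k] := by
        rw [List.getD_eq_getElem?_getD, List.getElem?_eq_getElem hk]; rfl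
      refine ⟨mat[k], List.getElem_mem hk, ?_⟩
      rw [PySem.List.pyGetD_zero]
      unfold gC at hv
      rw [hgk] at hv
      simpa using hv
  -- stage 3 with its condition expressed on mat
  have h3 : Shp mat (if (mat.headD []).contains (1 : Int) = true then
      (PySem.List.pyRange 0 ((mat.headD []).length : Int) 1).foldl (fun M j => pvSetCell M 0 j 1) M2
    else M2) ∧
      ∀ k l, gC (if (mat.headD []).contains (1 : Int) = true then
      (PySem.List.pyRange 0 ((mat.headD []).length : Int) 1).foldl (fun M j => pvSetCell M 0 j 1) M2
    else M2) k l =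
        if (∃ l', l' < (mat.headD []).length ∧ gC mat 0 l' = 1) ∧ k = 0 ∧ l < (mat.headD []).length
        then 1 else gC M2 k l := by
    by_cases hFRb : (mat.headD []).contains (1 : Int) = true
    · rw [if_pos hFRb]
      obtain ⟨hS3, hpt3⟩ := fillRowB mat M2 hS2 hne ((mat.headD []).length) le_rfl
      refine ⟨hS3, fun k l => ?_⟩
      rw [hpt3]
      by_cases hc : k = 0 ∧ l < (mat.headD []).length
      · rw [if_pos hc, if_pos ⟨hFR.1 hFRb, hc.1, hc.2⟩]
      · rw [if_neg hc, if_neg (fun h => hc ⟨h.2.1, h.2.2⟩)]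
    · rw [if_neg hFRb]
      refine ⟨hS2, fun k l => ?_⟩
      rw [if_neg (fun h => hFRb (hFR.2 h.1))]
  obtain ⟨hS3, hpt3⟩ := h3
  set M3 := (if (mat.headD []).contains (1 : Int) = true then
      (PySem.List.pyRange 0 ((mat.headD []).length : Int) 1).foldl (fun M j => pvSetCell M 0 j 1) M2
    else M2) with hM3
  have h4 : Shp mat (if mat.any (fun row => PySem.List.pyGetD row 0 0 == 1) = true then
      (PySem.List.pyRange 0 (mat.length : Int) 1).foldl (fun M i => pvSetCell M i 0 1) M3
    else M3) ∧
      ∀ k l, gC (if mat.any (fun row => PySem.List.pyGetD row 0 0 == 1) = true then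
      (PySem.List.pyRange 0 (mat.length : Int) 1).foldl (fun M i => pvSetCell M i 0 1) M3
    else M3) k l =
        if (∃ k', k' < mat.length ∧ gC mat k' 0 = 1) ∧ l = 0 ∧ k < mat.length
        then 1 else gC M3 k l := by
    by_cases hFCb : mat.any (fun row => PySem.List.pyGetD row 0 0 == 1) = true
    · rw [if_pos hFCb]
      obtain ⟨hS4, hpt4⟩ := fillColB mat M3 hm hS3 hm1 mat.length le_rfl
      refine ⟨hS4, fun k l => ?_⟩
      rw [hpt4]
      by_cases hc : l = 0 ∧ k < mat.length
      · rw [if_pos hc, if_pos ⟨hFC.1 hFCb, hc.1, hc.2⟩]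
      · rw [if_neg hc, if_neg (fun h => hc ⟨h.2.1, h.2.2⟩)]
    · rw [if_neg hFCb]
      refine ⟨hS3, fun k l => ?_⟩
      rw [if_neg (fun h => hFCb (hFC.2 h.1))]
  obtain ⟨hS4, hpt4⟩ := h4
  -- what the stage-1 markers say, as propositions about mat
  have factA : ∀ k, 1 ≤ k → k < mat.length →
      (gC M1 k 0 = 1 ↔ ∃ l', l' < (mat.headD []).length ∧ gC mat k l' = 1) := by
    intro k h1 h2
    rw [hpt1 k 0]
    by_cases hRin : ∃ l', l' < (mat.headD []).length ∧ 1 ≤ l' ∧ gC mat k l' = 1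
    · rw [if_pos ⟨rfl, h1, h2, hRin⟩]
      obtain ⟨l', hl', h1l, hv⟩ := hRin
      exact iff_of_true rfl ⟨l', hl', hv⟩
    · rw [if_neg (by rintro ⟨-, -, -, hr⟩; exact hRin hr), if_neg (by omega)]
      constructor
      · intro hv; exact ⟨0, by omega, hv⟩
      · rintro ⟨l', hl', hv⟩
        by_cases hl0 : l' = 0
        · exact hl0 ▸ hv
        · exact absurd ⟨l', hl', by omega, hv⟩ hRin
  have factB : ∀ l, 1 ≤ l → l < (mat.headD []).length →
      (gC M1 0 l = 1 ↔ ∃ k', k' < mat.length ∧ gC mat k' l = 1) := by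
    intro l h1 h2
    rw [hpt1 0 l]
    rw [if_neg (by rintro ⟨hl0, -⟩; omega)]
    by_cases hCin : ∃ k', k' < mat.length ∧ 1 ≤ k' ∧ gC mat k' l = 1
    · rw [if_pos ⟨rfl, h1, h2, hCin⟩]
      obtain ⟨k', hk', h1k, hv⟩ := hCin
      exact iff_of_true rfl ⟨k', hk', hv⟩
    · rw [if_neg (by rintro ⟨-, -, -, hc⟩; exact hCin hc)]
      constructor
      · intro hv; exact ⟨0, by omega, hv⟩
      · rintro ⟨k', hk', hv⟩
        by_cases hk0 : k' = 0
        · exact hk0 ▸ hv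
        · exact absurd ⟨k', hk', by omega, hv⟩ hCin
  refine ⟨hS4, fun k l hk => ?_⟩
  rw [hpt4, hpt3, hpt2]
  by_cases hT : l < (mat.headD []).length ∧
      ((∃ l', l' < (mat.headD []).length ∧ gC mat k l' = 1) ∨
       (∃ k', k' < mat.length ∧ gC mat k' l = 1))
  · rw [if_pos hT]
    obtain ⟨hlm, hRC⟩ := hT
    rcases hRC with hR | hC
    · by_cases hk0 : k = 0
      · apply ite_one
        rw [if_pos ⟨hk0 ▸ hR, hk0, hlm⟩]
      · by_cases hl0 : l = 0
        · by_cases hC0 : ∃ k', k' < mat.length ∧ gC mat k' 0 = 1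
          · rw [if_pos ⟨hC0, hl0, hk⟩]
          · -- row k's witness must sit outside column 0
            have hne0 : gC mat k 0 ≠ 1 := fun h => hC0 ⟨k, hk, h⟩
            obtain ⟨l', hl', hv⟩ := hR
            have h1l : 1 ≤ l' := by
              rcases Nat.eq_zero_or_pos l' with h | h
              · exact absurd (h ▸ hv) hne0
              · exact h
            rw [if_neg (fun h => hC0 h.1),
                if_neg (fun h => hk0 h.2.1),
                if_neg (by rintro ⟨-, -, h1l', -⟩; omega),
                hpt1, if_pos ⟨hl0, by omega, hk, l', hl', h1l, hv⟩]
        · apply ite_one; apply ite_one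
          rw [if_pos ⟨by omega, hk, by omega, hlm,
              Or.inl ((factA k (by omega) hk).2 hR)⟩]
    · by_cases hl0 : l = 0
      · rw [if_pos ⟨hl0 ▸ hC, hl0, hk⟩]
      · by_cases hk0 : k = 0
        · by_cases hR0 : ∃ l', l' < (mat.headD []).length ∧ gC mat 0 l' = 1
          · apply ite_one
            rw [if_pos ⟨hR0, hk0, hlm⟩]
          · have hne0 : gC mat 0 l ≠ 1 := fun h => hR0 ⟨l, hlm, h⟩
            obtain ⟨k', hk', hv⟩ := hC
            have h1k : 1 ≤ k' := by
              rcases Nat.eq_zero_or_pos k' with h | h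
              · exact absurd (h ▸ hv) hne0
              · exact h
            rw [if_neg (by rintro ⟨-, hl0', -⟩; omega),
                if_neg (fun h => hR0 h.1),
                if_neg (by rintro ⟨h1k', -⟩; omega),
                hpt1, if_neg (by rintro ⟨hl0', -⟩; omega),
                if_pos ⟨hk0, by omega, hlm, k', hk', h1k, hv⟩]
        · apply ite_one; apply ite_one
          rw [if_pos ⟨by omega, hk, by omega, hlm,
              Or.inr ((factB l (by omega) hlm).2 hC)⟩]
  · rw [if_neg hT]
    have hn4 : ¬ ((∃ k', k' < mat.length ∧ gC mat k' 0 = 1) ∧ l = 0 ∧ k < mat.length) := by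
      rintro ⟨hC0, hl0, -⟩
      exact hT ⟨by omega, Or.inr (hl0 ▸ hC0)⟩
    have hn3 : ¬ ((∃ l', l' < (mat.headD []).length ∧ gC mat 0 l' = 1) ∧ k = 0 ∧ l < (mat.headD []).length) := by
      rintro ⟨hR0, hk0, hlm⟩
      exact hT ⟨hlm, Or.inl (hk0 ▸ hR0)⟩
    have hn2 : ¬ (1 ≤ k ∧ k < mat.length ∧ 1 ≤ l ∧ l < (mat.headD []).length ∧
        (gC M1 k 0 = 1 ∨ gC M1 0 l = 1)) := by
      rintro ⟨h1k, hkn, h1l, hlm, hor⟩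
      rcases hor with h | h
      · exact hT ⟨hlm, Or.inl ((factA k h1k hkn).1 h)⟩
      · exact hT ⟨hlm, Or.inr ((factB l h1l hlm).1 h)⟩
    have hn1' : ¬ (l = 0 ∧ 1 ≤ k ∧ k < mat.length ∧
        ∃ l', l' < (mat.headD []).length ∧ 1 ≤ l' ∧ gC mat k l' = 1) := by
      rintro ⟨hl0, -, -, l', hl', -, hv⟩
      exact hT ⟨by omega, Or.inl ⟨l', hl', hv⟩⟩
    have hn0 : ¬ (k = 0 ∧ 1 ≤ l ∧ l < (mat.headD []).length ∧
        ∃ k', k' < mat.length ∧ 1 ≤ k' ∧ gC mat k' l = 1) := by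
      rintro ⟨-, -, hlm, k', hk', -, hv⟩
      exact hT ⟨hlm, Or.inr ⟨k', hk', hv⟩⟩
    rw [if_neg hn4, if_neg hn3, if_neg hn2, hpt1, if_neg hn1', if_neg hn0]

-- ---- A assembled pointwise (phase machinery) ----

def rowUpd (q : Int → Bool) (row : List Int) : Nat → List Int
  | 0 => row
  | b + 1 => if q (b : Int) then (rowUpd q row b).set b 1 else rowUpd q row b

lemma length_rowUpd (q : Int → Bool) (row : List Int) (b : Nat) :
    (rowUpd q row b).length = row.length := by
  induction b with
  | zero => rfl
  | succ b ih => simp [rowUpd]; split <;> simp [ih]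

lemma rowUpd_getD (q : Int → Bool) (row : List Int) (b l : Nat) :
    (rowUpd q row b).getD l 0 =
      if l < b ∧ l < row.length ∧ q (l : Int) = true then 1 else row.getD l 0 := by
  induction b with
  | zero => simp [rowUpd]
  | succ b ih =>
    by_cases hq : q (b : Int) = true
    · simp only [rowUpd, hq, if_true]
      by_cases hl : l = b
      · subst hl
        by_cases hlen : l < row.length
        · rw [List.getD_eq_getElem?_getD,
              List.getElem?_set_self (by rw [length_rowUpd]; exact hlen)]
          simp only [Option.getD_some]
          rw [if_pos ⟨by omega, hlen, hq⟩]
        · rw [List.set_eq_of_length_le (by rw [length_rowUpd]; omega), ih]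
          rw [if_neg (by omega), if_neg (by omega)]
      · rw [List.getD_eq_getElem?_getD, List.getElem?_set_ne (fun h => hl h.symm),
            ← List.getD_eq_getElem?_getD, ih]
        by_cases h1 : l < b ∧ l < row.length ∧ q (l : Int) = true
        · rw [if_pos h1, if_pos ⟨by omega, h1.2⟩]
        · rw [if_neg h1, if_neg (by rintro ⟨h2, h3, h4⟩; exact h1 ⟨by omega, h3, h4⟩)]
    · simp only [rowUpd, hq, Bool.false_eq_true, if_false]
      rw [ih]
      by_cases h1 : l < b ∧ l < row.length ∧ q (l : Int) = true
      · rw [if_pos h1, if_pos ⟨by omega, h1.2⟩]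
      · rw [if_neg h1, if_neg ?_]
        rintro ⟨h2, h3, h4⟩
        rcases Nat.lt_succ_iff_lt_or_eq.1 h2 with h2 | rfl
        · exact h1 ⟨h2, h3, h4⟩
        · exact hq h4

lemma inner1_mem (row : List Int) (i : Int) (b : Nat)
    (rc : PySem.Set Int × PySem.Set Int) (x : Int) :
    (x ∈ ((PySem.List.pyRange 0 (b : Int) 1).foldl
        (fun rc j => if PySem.List.pyGetD row j 0 == 1 then
            (PySem.Set.add rc.1 i, PySem.Set.add rc.2 j) else rc) rc).1
      ↔ x ∈ rc.1 ∨ (x = i ∧ ∃ l : Nat, l < b ∧ row.getD l 0 = 1)) ∧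
    (x ∈ ((PySem.List.pyRange 0 (b : Int) 1).foldl
        (fun rc j => if PySem.List.pyGetD row j 0 == 1 then
            (PySem.Set.add rc.1 i, PySem.Set.add rc.2 j) else rc) rc).2
      ↔ x ∈ rc.2 ∨ ∃ l : Nat, l < b ∧ x = (l : Int) ∧ row.getD l 0 = 1) := by
  induction b with
  | zero =>
    rw [show ((0 : Nat) : Int) = 0 by rfl, PySem.List.pyRange_one_eq_nil le_rfl]
    simp
  | succ b ih =>
    rw [show ((b + 1 : Nat) : Int) = (b : Int) + 1 by push_cast; ring,
        PySem.List.pyRange_one_succ_right (by positivity), List.foldl_append]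
    simp only [List.foldl_cons, List.foldl_nil]
    by_cases h : row.getD b 0 = 1
    · simp only [PySem.List.pyGetD_natCast, h, beq_self_eq_true, if_true]
      constructor
      · rw [PySem.Set.mem_add, ih.1]
        constructor
        · rintro ((hx | ⟨hx, l, hl, hv⟩) | hx)
          · exact Or.inl hx
          · exact Or.inr ⟨hx, l, by omega, hv⟩
          · exact Or.inr ⟨hx, b, by omega, h⟩
        · rintro (hx | ⟨hx, l, hl, hv⟩)
          · exact Or.inl (Or.inl hx)
          · rcases Nat.lt_succ_iff_lt_or_eq.1 hl with hl | rfl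
            · exact Or.inl (Or.inr ⟨hx, l, hl, hv⟩)
            · exact Or.inr hx
      · rw [PySem.Set.mem_add, ih.2]
        constructor
        · rintro ((hx | ⟨l, hl, hx, hv⟩) | hx)
          · exact Or.inl hx
          · exact Or.inr ⟨l, by omega, hx, hv⟩
          · exact Or.inr ⟨b, by omega, hx, h⟩
        · rintro (hx | ⟨l, hl, hx, hv⟩)
          · exact Or.inl (Or.inl hx)
          · rcases Nat.lt_succ_iff_lt_or_eq.1 hl with hl | rfl
            · exact Or.inl (Or.inr ⟨l, hl, hx, hv⟩)
            · exact Or.inr hx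
    · have hne : ¬ ((row.getD b 0 == 1) = true) := by simpa using h
      simp only [PySem.List.pyGetD_natCast]
      rw [if_neg hne]
      refine ⟨ih.1.trans ?_, ih.2.trans ?_⟩
      · constructor
        · rintro (hx | ⟨hx, l, hl, hv⟩)
          · exact Or.inl hx
          · exact Or.inr ⟨hx, l, by omega, hv⟩
        · rintro (hx | ⟨hx, l, hl, hv⟩)
          · exact Or.inl hx
          · rcases Nat.lt_succ_iff_lt_or_eq.1 hl with hl | rfl
            · exact Or.inr ⟨hx, l, hl, hv⟩
            · exact absurd hv h
      · constructor
        · rintro (hx | ⟨l, hl, hx, hv⟩)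
          · exact Or.inl hx
          · exact Or.inr ⟨l, by omega, hx, hv⟩
        · rintro (hx | ⟨l, hl, hx, hv⟩)
          · exact Or.inl hx
          · rcases Nat.lt_succ_iff_lt_or_eq.1 hl with hl | rfl
            · exact Or.inr ⟨l, hl, hx, hv⟩
            · exact absurd hv h

lemma outer1_mem (mat : List (List Int)) (W : Nat) (a : Nat) (x : Int) :
    (x ∈ ((PySem.List.pyRange 0 (a : Int) 1).foldl
        (fun rc i =>
          (PySem.List.pyRange 0 (W : Int) 1).foldl
            (fun rc j =>
              if PySem.List.pyGetD (PySem.List.pyGetD mat i ([] : List Int)) j 0 == 1 then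
                (PySem.Set.add rc.1 i, PySem.Set.add rc.2 j)
              else rc) rc)
        ((PySem.Set.empty : PySem.Set Int), (PySem.Set.empty : PySem.Set Int))).1
      ↔ ∃ k : Nat, k < a ∧ x = (k : Int) ∧ ∃ l : Nat, l < W ∧ (mat.getD k []).getD l 0 = 1) ∧
    (x ∈ ((PySem.List.pyRange 0 (a : Int) 1).foldl
        (fun rc i =>
          (PySem.List.pyRange 0 (W : Int) 1).foldl
            (fun rc j =>
              if PySem.List.pyGetD (PySem.List.pyGetD mat i ([] : List Int)) j 0 == 1 then
                (PySem.Set.add rc.1 i, PySem.Set.add rc.2 j)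
              else rc) rc)
        ((PySem.Set.empty : PySem.Set Int), (PySem.Set.empty : PySem.Set Int))).2
      ↔ ∃ l : Nat, l < W ∧ x = (l : Int) ∧ ∃ k : Nat, k < a ∧ (mat.getD k []).getD l 0 = 1) := by
  induction a with
  | zero =>
    rw [show ((0 : Nat) : Int) = 0 by rfl, PySem.List.pyRange_one_eq_nil le_rfl]
    simp
  | succ a ih =>
    rw [show ((a + 1 : Nat) : Int) = (a : Int) + 1 by push_cast; ring,
        PySem.List.pyRange_one_succ_right (by positivity), List.foldl_append]
    simp only [List.foldl_cons, List.foldl_nil]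
    have hrow : PySem.List.pyGetD mat ((a : Nat) : Int) ([] : List Int) = mat.getD a [] := by
      simp
    have h1 := inner1_mem (PySem.List.pyGetD mat ((a : Nat) : Int) ([] : List Int))
      ((a : Nat) : Int) W
      ((PySem.List.pyRange 0 ((a : Nat) : Int) 1).foldl
        (fun rc i =>
          (PySem.List.pyRange 0 (W : Int) 1).foldl
            (fun rc j =>
              if PySem.List.pyGetD (PySem.List.pyGetD mat i ([] : List Int)) j 0 == 1 then
                (PySem.Set.add rc.1 i, PySem.Set.add rc.2 j)
              else rc) rc)
        ((PySem.Set.empty : PySem.Set Int), (PySem.Set.empty : PySem.Set Int))) x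
    constructor
    · rw [h1.1, ih.1, hrow]
      constructor
      · rintro (⟨k, hk, hkk, l, hl, hv⟩ | ⟨hx, l, hl, hv⟩)
        · exact ⟨k, by omega, hkk, l, hl, hv⟩
        · exact ⟨a, by omega, hx, l, hl, hv⟩
      · rintro ⟨k, hk, hx, l, hl, hv⟩
        rcases Nat.lt_succ_iff_lt_or_eq.1 hk with hk | rfl
        · exact Or.inl ⟨k, hk, hx, l, hl, hv⟩
        · exact Or.inr ⟨hx, l, hl, hv⟩
    · rw [h1.2, ih.2, hrow]
      constructor
      · rintro (⟨l, hl, hx, k, hk, hv⟩ | ⟨l, hl, hx, hv⟩)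
        · exact ⟨l, hl, hx, k, by omega, hv⟩
        · exact ⟨l, hl, hx, a, by omega, hv⟩
      · rintro ⟨l, hl, hx, k, hk, hv⟩
        rcases Nat.lt_succ_iff_lt_or_eq.1 hk with hk | rfl
        · exact Or.inl ⟨l, hl, hx, k, hk, hv⟩
        · exact Or.inr ⟨l, hl, hx, hv⟩

lemma inner2_spec (p : Int → Int → Bool) (m : List (List Int)) (k : Nat)
    (hk : k < m.length) (c : Nat) :
    (PySem.List.pyRange 0 (c : Int) 1).foldl
      (fun m j => if p (k : Int) j then
          PySem.List.pySetD m (k : Int)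
            (PySem.List.pySetD (PySem.List.pyGetD m (k : Int) ([] : List Int)) j 1)
        else m) m
    = m.set k (rowUpd (p (k : Int)) (m.getD k []) c) := by
  induction c with
  | zero =>
    rw [show ((0 : Nat) : Int) = 0 from rfl, PySem.List.pyRange_one_eq_nil le_rfl]
    simp only [List.foldl_nil, rowUpd]
    rw [List.getD_eq_getElem?_getD, List.getElem?_eq_getElem hk]
    simp [List.set_getElem_self hk]
  | succ c ih =>
    rw [show ((c + 1 : Nat) : Int) = (c : Int) + 1 by push_cast; ring,
        PySem.List.pyRange_one_succ_right (by positivity), List.foldl_append, ih]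
    simp only [List.foldl_cons, List.foldl_nil]
    have hget : (m.set k (rowUpd (p (k : Int)) (m.getD k []) c)).getD k []
        = rowUpd (p (k : Int)) (m.getD k []) c := by
      rw [List.getD_eq_getElem?_getD, List.getElem?_set_self (by simpa using hk)]; rfl
    by_cases hp : p ((k : Nat) : Int) ((c : Nat) : Int) = true
    · simp only [hp, if_true, PySem.List.pyGetD_natCast, PySem.List.pySetD_natCast, hget,
        List.set_set, rowUpd]
    · simp only [hp, Bool.false_eq_true, if_false, rowUpd]

lemma outer2_spec (p : Int → Int → Bool) (mat : List (List Int)) (a : Nat)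
    (ha : a ≤ mat.length) :
    ((PySem.List.pyRange 0 (a : Int) 1).foldl
      (fun m i =>
        (PySem.List.pyRange 0 ((PySem.List.pyGetD m 0 ([] : List Int)).length : Int) 1).foldl
          (fun m j => if p i j then
              PySem.List.pySetD m i
                (PySem.List.pySetD (PySem.List.pyGetD m i ([] : List Int)) j 1)
            else m) m)
      mat).length = mat.length ∧
    ∀ k : Nat, k < mat.length →
      ((PySem.List.pyRange 0 (a : Int) 1).foldl
        (fun m i =>
          (PySem.List.pyRange 0 ((PySem.List.pyGetD m 0 ([] : List Int)).length : Int) 1).foldl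
            (fun m j => if p i j then
                PySem.List.pySetD m i
                  (PySem.List.pySetD (PySem.List.pyGetD m i ([] : List Int)) j 1)
              else m) m)
        mat).getD k []
      = if k < a then rowUpd (p (k : Int)) (mat.getD k []) ((mat.getD 0 []).length)
        else mat.getD k [] := by
  induction a with
  | zero =>
    rw [show ((0 : Nat) : Int) = 0 from rfl, PySem.List.pyRange_one_eq_nil le_rfl]
    simp
  | succ a ih =>
    have ha' : a < mat.length := by omega
    obtain ⟨hlen, hpt⟩ := ih (by omega)
    rw [show ((a + 1 : Nat) : Int) = (a : Int) + 1 by push_cast; ring,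
        PySem.List.pyRange_one_succ_right (by positivity), List.foldl_append]
    simp only [List.foldl_cons, List.foldl_nil]
    rw [inner2_spec p _ a (by rw [hlen]; exact ha')]
    have hFa := hpt a ha'
    rw [if_neg (lt_irrefl a)] at hFa
    have hc0 := hpt 0 (by omega)
    rw [hFa]
    have hc : (PySem.List.pyGetD
        ((PySem.List.pyRange 0 (a : Int) 1).foldl
          (fun m i =>
            (PySem.List.pyRange 0 ((PySem.List.pyGetD m 0 ([] : List Int)).length : Int) 1).foldl
              (fun m j => if p i j then
                  PySem.List.pySetD m i
                    (PySem.List.pySetD (PySem.List.pyGetD m i ([] : List Int)) j 1)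
                else m) m)
          mat) 0 ([] : List Int)).length = (mat.getD 0 []).length := by
      rw [PySem.List.pyGetD_zero, hc0]
      split
      · rw [length_rowUpd]
      · rfl
    rw [hc]
    refine ⟨by simp [hlen], fun k hk => ?_⟩
    by_cases hka : k = a
    · subst hka
      rw [List.getD_eq_getElem?_getD, List.getElem?_set_self (by rw [hlen]; exact ha')]
      simp only [Option.getD_some]
      rw [if_pos (by omega)]
    · rw [List.getD_eq_getElem?_getD, List.getElem?_set_ne (fun h => hka h.symm),
          ← List.getD_eq_getElem?_getD, hpt k hk]
      by_cases h1 : k < a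
      · rw [if_pos h1, if_pos (by omega)]
      · rw [if_neg h1, if_neg (by omega)]

def pvP1 (mat : List (List Int)) : PySem.Set Int × PySem.Set Int :=
  (PySem.List.pyRange 0 (mat.length : Int) 1).foldl
    (fun rc i =>
      (PySem.List.pyRange 0 ((PySem.List.pyGetD mat 0 ([] : List Int)).length : Int) 1).foldl
        (fun rc j =>
          if PySem.List.pyGetD (PySem.List.pyGetD mat i ([] : List Int)) j 0 == 1 then
            (PySem.Set.add rc.1 i, PySem.Set.add rc.2 j)
          else rc)
        rc)
    ((PySem.Set.empty : PySem.Set Int), (PySem.Set.empty : PySem.Set Int))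

def pvP2 (mat : List (List Int)) (p : Int → Int → Bool) : List (List Int) :=
  (PySem.List.pyRange 0 (mat.length : Int) 1).foldl
    (fun m i =>
      (PySem.List.pyRange 0 ((PySem.List.pyGetD m 0 ([] : List Int)).length : Int) 1).foldl
        (fun m j =>
          if p i j then
            PySem.List.pySetD m i
              (PySem.List.pySetD (PySem.List.pyGetD m i ([] : List Int)) j 1)
          else m)
        m)
    mat

lemma A_char (mat : List (List Int)) :
    booleanMatrix mat
      = pvP2 mat (fun i j =>
          PySem.Set.contains (pvP1 mat).1 i || PySem.Set.contains (pvP1 mat).2 j) := rfl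

lemma pvP1_mem (mat : List (List Int)) (x : Int) :
    (x ∈ (pvP1 mat).1 ↔ ∃ k : Nat, k < mat.length ∧ x = (k : Int) ∧
        ∃ l : Nat, l < (PySem.List.pyGetD mat 0 ([] : List Int)).length ∧
          (mat.getD k []).getD l 0 = 1) ∧
    (x ∈ (pvP1 mat).2 ↔ ∃ l : Nat, l < (PySem.List.pyGetD mat 0 ([] : List Int)).length ∧
        x = (l : Int) ∧ ∃ k : Nat, k < mat.length ∧ (mat.getD k []).getD l 0 = 1) :=
  outer1_mem mat (PySem.List.pyGetD mat 0 ([] : List Int)).length mat.length x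

lemma pvP2_spec (mat : List (List Int)) (p : Int → Int → Bool) :
    (pvP2 mat p).length = mat.length ∧
    ∀ k : Nat, k < mat.length →
      (pvP2 mat p).getD k []
        = if k < mat.length then rowUpd (p (k : Int)) (mat.getD k []) ((mat.getD 0 []).length)
          else mat.getD k [] :=
  outer2_spec p mat mat.length le_rfl

lemma A_spec (mat : List (List Int)) (hpre : Pre_booleanMatrix mat) :
    Shp mat (booleanMatrix mat) ∧
    ∀ k l, k < mat.length → gC (booleanMatrix mat) k l =
      if l < (mat.headD []).length ∧
          ((∃ l', l' < (mat.headD []).length ∧ gC mat k l' = 1) ∨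
           (∃ k', k' < mat.length ∧ gC mat k' l = 1)) then 1
      else gC mat k l := by
  obtain ⟨hlen, hpt⟩ := pvP2_spec mat
    (fun i j => PySem.Set.contains (pvP1 mat).1 i || PySem.Set.contains (pvP1 mat).2 j)
  rw [A_char]
  have hW : (PySem.List.pyGetD mat 0 ([] : List Int)).length = (mat.headD []).length := by
    rw [PySem.List.pyGetD_zero, ← headD_eq_getD_zero]
  constructor
  · refine ⟨hlen, fun k => ?_⟩
    by_cases hk : k < mat.length
    · rw [hpt k hk, if_pos hk, length_rowUpd]
    · rw [List.getD_eq_getElem?_getD, List.getElem?_eq_none (by omega),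
          List.getD_eq_getElem?_getD (l := mat), List.getElem?_eq_none (by omega)]
  · intro k l hk
    have hr : (PySem.Set.contains (pvP1 mat).1 ((k : Nat) : Int) = true)
        ↔ (∃ l', l' < (mat.headD []).length ∧ gC mat k l' = 1) := by
      rw [PySem.Set.contains_iff, (pvP1_mem mat _).1]
      constructor
      · rintro ⟨k', hk', hkk, l', hl', hv⟩
        have : k = k' := by exact_mod_cast hkk
        subst this
        exact ⟨l', by omega, hv⟩
      · rintro ⟨l', hl', hv⟩
        exact ⟨k, hk, rfl, l', by omega, hv⟩
    have hc : (PySem.Set.contains (pvP1 mat).2 ((l : Nat) : Int) = true)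
        ↔ (l < (mat.headD []).length ∧ ∃ k', k' < mat.length ∧ gC mat k' l = 1) := by
      rw [PySem.Set.contains_iff, (pvP1_mem mat _).2]
      constructor
      · rintro ⟨l', hl', hll, k', hk', hv⟩
        have : l = l' := by exact_mod_cast hll
        subst this
        exact ⟨by omega, k', hk', hv⟩
      · rintro ⟨hlm, k', hk', hv⟩
        exact ⟨l, by omega, rfl, k', hk', hv⟩
    have hrl : (mat.headD []).length ≤ (mat.getD k []).length := row_len_ge mat hpre k hk
    unfold gC
    rw [hpt k hk, if_pos hk, rowUpd_getD, ← headD_eq_getD_zero]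
    by_cases hcond : l < (mat.headD []).length ∧
        ((∃ l', l' < (mat.headD []).length ∧ (mat.getD k []).getD l' 0 = 1) ∨
         (∃ k', k' < mat.length ∧ (mat.getD k' []).getD l 0 = 1))
    · rw [if_pos ?_, if_pos hcond]
      refine ⟨hcond.1, by omega, (Bool.or_eq_true _ _).mpr ?_⟩
      rcases hcond.2 with h | h
      · exact Or.inl (hr.2 h)
      · exact Or.inr (hc.2 ⟨hcond.1, h⟩)
    · rw [if_neg ?_, if_neg hcond]
      rintro ⟨h1, h2, h3⟩
      rcases (Bool.or_eq_true _ _).mp h3 with h | h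
      · exact hcond ⟨h1, Or.inl (hr.1 h)⟩
      · exact hcond ⟨h1, Or.inr (hc.1 h).2⟩

-- ---- glue: equal shape + equal cells ⇒ equal matrices ----

lemma eq_of_shape_cells (mat M N : List (List Int)) (h1 : Shp mat M) (h2 : Shp mat N)
    (h : ∀ k l, k < mat.length → l < (mat.getD k []).length → gC M k l = gC N k l) :
    M = N := by
  apply List.ext_getElem (by rw [h1.1, h2.1])
  intro k hk1 hk2
  have hk : k < mat.length := by rw [← h1.1]; exact hk1
  have hM : M[k] = M.getD k [] := by
    rw [List.getD_eq_getElem?_getD, List.getElem?_eq_getElem hk1]; rfl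
  have hN : N[k] = N.getD k [] := by
    rw [List.getD_eq_getElem?_getD, List.getElem?_eq_getElem hk2]; rfl
  apply List.ext_getElem (by rw [hM, hN, h1.2, h2.2])
  intro l hl1 hl2
  have hl : l < (mat.getD k []).length := by
    rw [hM, h1.2] at hl1; exact hl1
  have := h k l hk hl
  unfold gC at this
  rw [← hM, ← hN] at this
  rw [List.getD_eq_getElem?_getD, List.getElem?_eq_getElem hl1] at this
  rw [List.getD_eq_getElem?_getD, List.getElem?_eq_getElem hl2] at this
  simpa using this

-- ===== VERDICT (by name: the statement is the Claim_ definition above) =====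
theorem booleanMatrix_spec : Claim_equal_booleanMatrix := by
  intro mat _ hpre
  unfold Spec_booleanMatrix
  by_cases hne : mat = []
  · subst hne; decide
  by_cases hm0 : mat.headD ([] : List Int) = []
  · have hB : booleanMatrix_alt mat = mat := by
      unfold booleanMatrix_alt
      rw [if_pos (Or.inr hm0)]
    rw [hB]
    obtain ⟨hS, hpt⟩ := A_spec mat hpre
    refine eq_of_shape_cells mat _ _ hS (shp_refl mat) (fun k l hk hl => ?_)
    rw [hpt k l hk, if_neg ?_]
    rintro ⟨hlm, -⟩
    rw [hm0] at hlm
    simp at hlm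
  · obtain ⟨hSA, hptA⟩ := A_spec mat hpre
    obtain ⟨hSB, hptB⟩ := B_spec mat hpre hne hm0
    refine eq_of_shape_cells mat _ _ hSA hSB (fun k l hk hl => ?_)
    rw [hptA k l hk, hptB k l hk]
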